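-- pv_equiv track=rewrite | github.com/AfnanAmiludin/nusarp | core/fields/encrypted.py | is_hashed_already
-- ===== SOURCE A (Python) =====
-- import string
--
-- SEARCH_HASH_PREFIX = 'enc:'
--
-- def is_hashed_already(data_string):
--     if data_string is None:
--         return False
--     if not isinstance(data_string, str):
--         return False
--     if not data_string.startswith(SEARCH_HASH_PREFIX):
--         return False
--     actual_hash = data_string[len(SEARCH_HASH_PREFIX):]
--     if len(actual_hash) != 64:
--         return False
--     return all([char in string.hexdigits for char in actual_hash])
-- ===== SOURCE B (Python) =====
-- import re
--
-- SEARCH_HASH_PREFIX = 'enc:'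
--
-- _ENC_RE = re.compile(r'enc:[0-9a-fA-F]{64}')
--
--
-- def is_hashed_already(data_string):
--     if not isinstance(data_string, str):
--         return False
--     return _ENC_RE.fullmatch(data_string) is not None
-- ===== Notes on version B (the rewrite author's own statement) =====
-- stated objective: idiomatic
-- what changed: The explicit prefix test, slice, length test and per-character hexdigit loop are replaced by a single precompiled anchored regex fullmatch r'enc:[0-9a-fA-F]{64}', with the isinstance guard (which also covers None) kept.
import Mathlib
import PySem

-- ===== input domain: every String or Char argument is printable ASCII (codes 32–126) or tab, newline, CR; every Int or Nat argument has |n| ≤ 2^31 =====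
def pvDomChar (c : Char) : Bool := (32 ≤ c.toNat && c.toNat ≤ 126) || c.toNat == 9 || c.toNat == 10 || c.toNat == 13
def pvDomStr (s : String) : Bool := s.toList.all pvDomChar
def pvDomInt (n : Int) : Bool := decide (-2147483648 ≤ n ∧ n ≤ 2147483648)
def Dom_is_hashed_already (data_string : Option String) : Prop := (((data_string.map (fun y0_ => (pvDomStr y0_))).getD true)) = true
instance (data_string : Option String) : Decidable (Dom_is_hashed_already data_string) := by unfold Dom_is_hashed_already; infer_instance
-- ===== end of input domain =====

-- B replaces A's prefix test, slice, length test and per-character hexdigit loop by one anchored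
-- regex fullmatch (idiomatic); equal return value is proved on all inputs.

-- ===== PORT A =====
-- string.hexdigits
def pvHexdigits : String := "0123456789abcdefABCDEF"

def pvSEARCH_HASH_PREFIX : String := "enc:"

-- literal port of A; 'char in string.hexdigits' for a single char is PySem.Chars.isIn [char] hexdigits
def is_hashed_already (data_string : Option String) : Bool :=
  match data_string with
  | none => false                                   -- data_string is None
  | some s =>                                       -- isinstance(data_string, str) holds
    if !(PySem.Str.startswith s pvSEARCH_HASH_PREFIX) then false
    else
      let actual_hash := PySem.Str.slice s (some (PySem.Str.len pvSEARCH_HASH_PREFIX)) none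
      if PySem.Str.len actual_hash ≠ 64 then false
      else actual_hash.toList.all (fun ch => PySem.Chars.isIn [ch] pvHexdigits.toList)

-- ===== PORT B =====
-- Hand-compiled matcher for the fixed anchored regex r'enc:[0-9a-fA-F]{64}' (fullmatch):
-- consume the literal prefix, then exactly 64 characters of the class, then end of input.
def pvHexRun : Nat → List Char → Bool
  | 0, [] => true
  | 0, _ :: _ => false
  | _ + 1, [] => false
  | n + 1, ch :: cs =>
      (('0' ≤ ch && ch ≤ '9') || ('a' ≤ ch && ch ≤ 'f') || ('A' ≤ ch && ch ≤ 'F')) && pvHexRun n cs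

def pvMatchLit : List Char → List Char → Bool
  | [], rest => pvHexRun 64 rest
  | _ :: _, [] => false
  | p :: ps, c :: cs => (c == p) && pvMatchLit ps cs

def is_hashed_already_alt (data_string : Option String) : Bool :=
  match data_string with
  | none => false                                   -- not isinstance(data_string, str)
  | some s => pvMatchLit "enc:".toList s.toList     -- re.fullmatch(r'enc:[0-9a-fA-F]{64}', s) is not None

-- ===== PRECONDITION & SPEC =====
def Spec_is_hashed_already (data_string : Option String) (out : Bool) : Prop := out = is_hashed_already_alt data_string
instance (data_string : Option String) (out : Bool) : Decidable (Spec_is_hashed_already data_string out) := by unfold Spec_is_hashed_already; infer_instance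

-- ===== CLAIM (what is proved, stated in full; the proofs are below) =====
def Claim_equal_is_hashed_already : Prop := ∀ (data_string : Option String), Dom_is_hashed_already data_string → Spec_is_hashed_already data_string (is_hashed_already data_string)

-- ===== LEMMAS AND PROOFS =====

def pvIsHexClass (ch : Char) : Bool :=
  ('0' ≤ ch && ch ≤ '9') || ('a' ≤ ch && ch ≤ 'f') || ('A' ≤ ch && ch ≤ 'F')

theorem pvHexdigits_contains (c : Char) :
    pvHexdigits.toList.contains c = pvIsHexClass c := by
  have h : pvHexdigits.toList
      = ['0','1','2','3','4','5','6','7','8','9','a','b','c','d','e','f','A','B','C','D','E','F'] := rfl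
  rw [Bool.eq_iff_iff]
  simp only [h, pvIsHexClass, List.contains_eq_mem, List.mem_cons, List.not_mem_nil, or_false,
    Char.ext_iff, UInt32.ext_iff, Char.le_def, UInt32.le_iff_toNat_le,
    Bool.or_eq_true, Bool.and_eq_true, decide_eq_true_eq]
  simp only [show ('0':Char).val.toNat = 48 from rfl, show ('1':Char).val.toNat = 49 from rfl,
    show ('2':Char).val.toNat = 50 from rfl, show ('3':Char).val.toNat = 51 from rfl,
    show ('4':Char).val.toNat = 52 from rfl, show ('5':Char).val.toNat = 53 from rfl,
    show ('6':Char).val.toNat = 54 from rfl, show ('7':Char).val.toNat = 55 from rfl,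
    show ('8':Char).val.toNat = 56 from rfl, show ('9':Char).val.toNat = 57 from rfl,
    show ('a':Char).val.toNat = 97 from rfl, show ('b':Char).val.toNat = 98 from rfl,
    show ('c':Char).val.toNat = 99 from rfl, show ('d':Char).val.toNat = 100 from rfl,
    show ('e':Char).val.toNat = 101 from rfl, show ('f':Char).val.toNat = 102 from rfl,
    show ('A':Char).val.toNat = 65 from rfl, show ('B':Char).val.toNat = 66 from rfl,
    show ('C':Char).val.toNat = 67 from rfl, show ('D':Char).val.toNat = 68 from rfl,
    show ('E':Char).val.toNat = 69 from rfl, show ('F':Char).val.toNat = 70 from rfl]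
  omega

theorem pvIsIn_single (c : Char) :
    PySem.Chars.isIn [c] pvHexdigits.toList = pvIsHexClass c := by
  rw [Bool.eq_iff_iff, PySem.Chars.isIn_iff_infix, List.singleton_infix_iff,
    ← pvHexdigits_contains c]
  simp [List.contains_eq_mem]

theorem pvHexRun_eq (cs : List Char) (n : Nat) :
    pvHexRun n cs = (decide (cs.length = n) && cs.all pvIsHexClass) := by
  induction cs generalizing n with
  | nil => cases n <;> simp [pvHexRun]
  | cons c cs ih =>
      cases n with
      | zero => simp [pvHexRun]
      | succ m =>
          simp only [pvHexRun, ih, List.all_cons, List.length_cons, pvIsHexClass]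
          by_cases h : cs.length = m
          · simp [h]
          · simp [h]

theorem pvMatchLit_eq (ps l : List Char) :
    pvMatchLit ps l = (ps.isPrefixOf l && pvHexRun 64 (l.drop ps.length)) := by
  induction ps generalizing l with
  | nil => simp [pvMatchLit, List.isPrefixOf]
  | cons p ps ih =>
      cases l with
      | nil => simp [pvMatchLit, List.isPrefixOf]
      | cons c cs =>
          simp only [pvMatchLit, ih, List.isPrefixOf, List.length_cons, List.drop_succ_cons,
            Bool.and_assoc, Bool.beq_comm]

-- ===== VERDICT (by name: the statement is the Claim_ definition above) =====
theorem is_hashed_already_spec : Claim_equal_is_hashed_already := by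
  intro ds _hdom
  unfold Spec_is_hashed_already
  cases ds with
  | none => rfl
  | some s =>
      have hpre : PySem.Str.startswith s pvSEARCH_HASH_PREFIX
          = "enc:".toList.isPrefixOf s.toList := rfl
      have hlit : ("enc:".toList.length : Nat) = 4 := rfl
      have hslice : (PySem.Str.slice s (some (PySem.Str.len pvSEARCH_HASH_PREFIX)) none).toList
          = s.toList.drop 4 := by
        have h4 : PySem.Str.len pvSEARCH_HASH_PREFIX = (4 : Int) := rfl
        simp only [PySem.Str.slice, h4, String.toList_ofList, PySem.Chars.slice]
        exact PySem.List.slice_from (xs := s.toList) (a := (4:Int)) (by norm_num)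
      simp only [is_hashed_already, is_hashed_already_alt, pvMatchLit_eq, pvHexRun_eq, hpre, hlit]
      rw [PySem.Str.len_eq, hslice]
      cases hp : ("enc:".toList.isPrefixOf s.toList) with
      | false => simp only [Bool.not_false, Bool.false_and, if_true]
      | true =>
        simp only [Bool.not_true, Bool.true_and, Bool.false_eq_true, if_false]
        by_cases hl : (s.toList.drop 4).length = 64
        · have hc : ¬ ((((s.toList.drop 4).length : Int) ≠ 64)) := by
            rw [hl]; norm_num
          rw [if_neg hc]
          simp [hl, pvIsIn_single]
        · have hc : (((s.toList.drop 4).length : Int) ≠ 64) := by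
            exact_mod_cast fun hh => hl (by exact_mod_cast hh)
          have hl2 : s.length - 4 ≠ 64 := by
            rw [← String.length_toList]
            simpa [List.length_drop] using hl
          rw [if_pos hc]
          simp [hl2]
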